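-- pv_equiv track=rewrite | github.com/eduardohenriquearnold/AdventOfCode | 2021/12/12.py | valid_route_1
-- ===== SOURCE A (Python) =====
-- from typing import DefaultDict
--
-- def valid_route_1(r):
--     '''check if a route is valid: a single visit to small caves are allowed'''
--
--     # count words
--     count = DefaultDict(int)
--     for w in r:
--         count[w] += 1
--
--     # check for repeated small caves
--     for w, c in count.items():
--         # ignore big caves
--         if w.isupper():
--             continue
--
--         if c > 1:
--             return False
--
--     return True
-- ===== SOURCE B (Python) =====
-- def valid_route_1(r):
--     '''check if a route is valid: a single visit to small caves are allowed'''
--     seen = set()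
--     for w in r:
--         # ignore big caves
--         if w.isupper():
--             continue
--         if w in seen:
--             return False
--         seen.add(w)
--     return True
-- ===== Notes on version B (the rewrite author's own statement) =====
-- stated objective: simpler
-- what changed: A single early-exiting pass keeping a set of small caves already seen replaces A's two passes (build a full word-count dict, then scan its items for a repeated small cave).
import Mathlib
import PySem

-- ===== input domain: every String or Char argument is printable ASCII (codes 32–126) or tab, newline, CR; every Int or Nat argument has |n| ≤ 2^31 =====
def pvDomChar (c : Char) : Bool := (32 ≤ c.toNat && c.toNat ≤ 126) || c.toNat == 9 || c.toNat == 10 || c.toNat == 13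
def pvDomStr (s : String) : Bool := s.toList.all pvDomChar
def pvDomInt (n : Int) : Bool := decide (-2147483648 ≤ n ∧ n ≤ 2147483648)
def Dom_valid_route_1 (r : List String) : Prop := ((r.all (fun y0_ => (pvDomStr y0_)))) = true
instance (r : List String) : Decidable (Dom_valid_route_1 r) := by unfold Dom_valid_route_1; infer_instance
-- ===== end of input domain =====

-- B replaces A's two passes (count dict, then item scan) by one early-exiting pass over the route
-- holding only the set of small caves seen so far; return values agree on every input.

-- hand-ported str.isupper(): exact on ASCII (some cased char, and no lowercase char); shared by both ports
def pvStrIsupper (s : String) : Bool :=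
  s.toList.any PySem.Chars.isupper && s.toList.all (fun c => !(PySem.Chars.islower c))

-- ===== PORT A =====
def pvCheckA : List (String × Int) → Bool
  | [] => true
  | (w, c) :: rest =>
      if pvStrIsupper w then pvCheckA rest
      else if c > 1 then false
      else pvCheckA rest

def valid_route_1 (r : List String) : Bool :=
  let count := r.foldl (fun d w => PySem.Dict.modify d w 0 (· + 1)) PySem.Dict.empty
  pvCheckA count.items

-- ===== PORT B =====
def pvGoB : List String → PySem.Set String → Bool
  | [], _ => true
  | w :: ws, seen =>
      if pvStrIsupper w then pvGoB ws seen
      else if PySem.Set.contains seen w then false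
      else pvGoB ws (PySem.Set.add seen w)

def valid_route_1_alt (r : List String) : Bool := pvGoB r PySem.Set.empty

-- ===== PRECONDITION & SPEC =====
def Spec_valid_route_1 (r : List String) (out : Bool) : Prop := out = valid_route_1_alt r
instance (r : List String) (out : Bool) : Decidable (Spec_valid_route_1 r out) := by unfold Spec_valid_route_1; infer_instance

-- ===== CLAIM (what is proved, stated in full; the proofs are below) =====
def Claim_equal_valid_route_1 : Prop := ∀ (r : List String), Dom_valid_route_1 r → Spec_valid_route_1 r (valid_route_1 r)

-- ===== LEMMAS AND PROOFS =====

theorem pvCheckA_map (r : List String) (ks : List String) :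
    pvCheckA (ks.map (fun k => (k, (r.count k : Int)))) =
      ks.all (fun k => pvStrIsupper k || decide (r.count k ≤ 1)) := by
  induction ks with
  | nil => rfl
  | cons k ks ih =>
      have hd : (!decide (1 < List.count k r)) = decide (List.count k r ≤ 1) := by
        rw [← decide_not]; exact decide_eq_decide.mpr (by omega)
      by_cases h : pvStrIsupper k = true <;> simp [pvCheckA, h, ih, hd]

theorem valid_route_1_iff (r : List String) :
    valid_route_1 r = true ↔ ∀ w ∈ r, pvStrIsupper w = true ∨ r.count w ≤ 1 := by
  have hc : (r.foldl (fun d w => PySem.Dict.modify d w 0 (· + 1)) PySem.Dict.empty) =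
      PySem.Dict.counter r := (PySem.Dict.counter_eq_foldl r).symm
  show pvCheckA (PySem.Dict.items _) = true ↔ _
  rw [hc, PySem.Dict.items_counter, pvCheckA_map]
  simp only [List.all_eq_true, PySem.Set.mem_ofList]
  constructor
  · intro h w hw; have := h w hw; simpa using this
  · intro h w hw; simpa using h w hw

theorem pvGoB_iff (ws : List String) (seen : PySem.Set String) :
    pvGoB ws seen = true ↔
      ∀ w ∈ ws, pvStrIsupper w = true ∨ (w ∉ seen ∧ ws.count w ≤ 1) := by
  induction ws generalizing seen with
  | nil => simp [pvGoB]
  | cons w ws ih =>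
      by_cases hup : pvStrIsupper w = true
      · simp only [pvGoB, hup, if_pos, ih]
        constructor
        · intro h v hv
          rcases List.mem_cons.1 hv with rfl | hv
          · exact Or.inl hup
          · by_cases hwv : w = v
            · exact Or.inl (hwv ▸ hup)
            · rcases h v hv with h' | ⟨hs, hcnt⟩
              · exact Or.inl h'
              · exact Or.inr ⟨hs, by rw [List.count_cons, if_neg (by simpa using hwv)]; omega⟩
        · intro h v hv
          rcases h v (List.mem_cons_of_mem _ hv) with h' | ⟨hs, hcnt⟩
          · exact Or.inl h'
          · rw [List.count_cons] at hcnt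
            refine Or.inr ⟨hs, ?_⟩
            by_cases hwv : w = v <;> simp [beq_iff_eq, hwv] at hcnt <;> omega
      · by_cases hmem : w ∈ seen
        · have hcont : PySem.Set.contains seen w = true := by
            simpa [PySem.Set.contains] using hmem
          simp only [pvGoB, hup, hcont, if_pos]
          constructor
          · intro h; exact absurd h (by simp)
          · intro h
            rcases h w (List.mem_cons_self) with h' | ⟨hs, _⟩
            · exact absurd h' hup
            · exact absurd hmem hs
        · have hcont : PySem.Set.contains seen w = false := by
            simp [PySem.Set.contains, hmem]
          simp only [pvGoB, hup, hcont, Bool.false_eq_true, if_false, ih]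
          constructor
          · intro h v hv
            rcases List.mem_cons.1 hv with rfl | hv
            · refine Or.inr ⟨hmem, ?_⟩
              by_cases hw : v ∈ ws
              · rcases h v hw with h' | ⟨hs, _⟩
                · exact absurd h' hup
                · exact absurd ((PySem.Set.mem_add _ _ _).2 (Or.inr rfl)) hs
              · rw [List.count_cons]
                simp [List.count_eq_zero_of_not_mem hw]
            · rcases h v hv with h' | ⟨hs, hcnt⟩
              · exact Or.inl h'
              · have hwv : ¬ (w = v) := by
                  rintro rfl; exact hs ((PySem.Set.mem_add _ _ _).2 (Or.inr rfl))
                refine Or.inr ⟨fun hv' => hs ((PySem.Set.mem_add _ _ _).2 (Or.inl hv')), ?_⟩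
                rw [List.count_cons, if_neg (by simpa using hwv)]; omega
          · intro h v hv
            rcases h v (List.mem_cons_of_mem _ hv) with h' | ⟨hs, hcnt⟩
            · exact Or.inl h'
            · have hwv : ¬ (w = v) := by
                rintro rfl
                rcases h w (List.mem_cons_self) with h' | ⟨_, hcnt'⟩
                · exact hup h'
                · rw [List.count_cons, if_pos (by simp)] at hcnt'
                  exact (List.count_eq_zero.1 (by omega)) hv
              refine Or.inr ⟨?_, ?_⟩
              · intro hv'
                rcases (PySem.Set.mem_add seen w v).1 hv' with h1 | h1
                · exact hs h1
                · exact hwv h1.symm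
              · rw [List.count_cons, if_neg (by simpa using hwv)] at hcnt; omega

theorem valid_route_1_alt_iff (r : List String) :
    valid_route_1_alt r = true ↔ ∀ w ∈ r, pvStrIsupper w = true ∨ r.count w ≤ 1 := by
  show pvGoB r PySem.Set.empty = true ↔ _
  rw [pvGoB_iff]
  simp [PySem.Set.empty]

-- ===== VERDICT (by name: the statement is the Claim_ definition above) =====
theorem valid_route_1_spec : Claim_equal_valid_route_1 := by
  intro r _
  show valid_route_1 r = valid_route_1_alt r
  rw [Bool.eq_iff_iff, valid_route_1_iff, valid_route_1_alt_iff]
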